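-- pv_equiv track=rewrite | github.com/bibek22/project-euler | python/pandigital.py | hasDouble
-- ===== SOURCE A (Python) =====
-- def hasDouble(n):
--     num = str(n)
--     if num.count("0"):
--         return True
--     for each in num:
--         if num.count(each) >= 2:
--             return True
--         else:
--             continue
--     return False
-- ===== SOURCE B (Python) =====
-- def hasDouble(n):
--     s = sorted(str(n))
--     if '0' in s:
--         return True
--     for a, b in zip(s, s[1:]):
--         if a == b:
--             return True
--     return False
-- ===== Notes on version B (the rewrite author's own statement) =====
-- stated objective: alternative
-- what changed: Sort-then-scan: sorts the digit characters once and detects a repeat by comparing adjacent characters of the sorted list, instead of A's per-character full .count scans.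
import Mathlib
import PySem

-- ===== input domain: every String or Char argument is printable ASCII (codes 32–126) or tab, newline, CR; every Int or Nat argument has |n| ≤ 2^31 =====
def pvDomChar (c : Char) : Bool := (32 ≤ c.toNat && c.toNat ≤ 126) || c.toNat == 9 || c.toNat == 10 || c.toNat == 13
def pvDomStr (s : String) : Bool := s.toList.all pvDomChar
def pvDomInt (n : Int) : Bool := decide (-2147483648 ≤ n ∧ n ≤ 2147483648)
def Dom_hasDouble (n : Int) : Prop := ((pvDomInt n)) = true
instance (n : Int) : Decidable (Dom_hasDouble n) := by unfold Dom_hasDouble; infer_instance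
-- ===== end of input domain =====

-- B sorts the characters of str(n) once and scans adjacent pairs for a repeat, instead of A's per-character .count scans (alternative algorithm).

-- ===== PORT A =====
-- the strings counted are single characters, so str.count equals the char count on the char list
def hasDoubleLoop (num : List Char) : List Char → Bool
  | [] => false
  | c :: rest => if 2 ≤ num.count c then true else hasDoubleLoop num rest

def hasDouble (n : Int) : Bool :=
  let num := PySem.Int.toChars n
  if num.count '0' ≠ 0 then true
  else hasDoubleLoop num num

-- ===== PORT B =====
-- the for-loop over zip(s, s[1:]) with an early return on the first equal pair
def adjEqLoop : List (Char × Char) → Bool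
  | [] => false
  | (a, b) :: rest => if a == b then true else adjEqLoop rest

def hasDouble_alt (n : Int) : Bool :=
  let s := PySem.List.sorted (PySem.Int.toChars n) (fun c => c) false
  if s.contains '0' then true
  else adjEqLoop (s.zip (PySem.List.slice s (some 1) none))

-- ===== PRECONDITION & SPEC =====
def Spec_hasDouble (n : Int) (out : Bool) : Prop := out = hasDouble_alt n
instance (n : Int) (out : Bool) : Decidable (Spec_hasDouble n out) := by unfold Spec_hasDouble; infer_instance

-- ===== CLAIM (what is proved, stated in full; the proofs are below) =====
def Claim_equal_hasDouble : Prop := ∀ (n : Int), Dom_hasDouble n → Spec_hasDouble n (hasDouble n)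

-- ===== LEMMAS AND PROOFS =====

lemma loop_eq_any (num : List Char) (l : List Char) :
    hasDoubleLoop num l = l.any (fun c => 2 ≤ num.count c) := by
  induction l with
  | nil => rfl
  | cons c rest ih =>
    by_cases h : 2 ≤ num.count c <;> simp [hasDoubleLoop, h, ih]

lemma any_count_eq_not_nodup (xs : List Char) :
    xs.any (fun c => 2 ≤ xs.count c) = !decide xs.Nodup := by
  rcases h : decide xs.Nodup with _ | _
  · have hnd : ¬ xs.Nodup := of_decide_eq_false h
    rw [List.nodup_iff_count_le_one] at hnd
    obtain ⟨a, ha⟩ := not_forall.mp hnd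
    have hmem : a ∈ xs := by
      rw [← List.count_pos_iff]; omega
    simp only [Bool.not_false, List.any_eq_true, decide_eq_true_eq]
    exact ⟨a, hmem, by omega⟩
  · have hnd : xs.Nodup := of_decide_eq_true h
    have hle := List.nodup_iff_count_le_one.mp hnd
    simp only [Bool.not_true, List.any_eq_false, decide_eq_true_eq]
    intro c _
    have := hle c
    omega

-- on a ≤-sorted list, an adjacent equal pair exists exactly when the list has a duplicate
lemma adjEqLoop_eq_not_nodup : ∀ (l : List Char), l.Pairwise (· ≤ ·) →
    adjEqLoop (l.zip l.tail) = !decide l.Nodup := by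
  intro l
  induction l with
  | nil => intro _; simp [adjEqLoop]
  | cons a t ih =>
    intro hp
    cases t with
    | nil => simp [adjEqLoop]
    | cons b t' =>
      have hp' : (b :: t').Pairwise (· ≤ ·) := hp.of_cons
      have hab : a ≤ b := (List.pairwise_cons.mp hp).1 b (by simp)
      have hat' : ∀ x ∈ t', a ≤ x := fun x hx => (List.pairwise_cons.mp hp).1 x (by simp [hx])
      have hbt' : ∀ x ∈ t', b ≤ x := fun x hx => (List.pairwise_cons.mp hp').1 x hx
      by_cases heq : a = b
      · subst heq
        have : ¬ (a :: a :: t').Nodup := by simp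
        simp [adjEqLoop, this]
      · have hnotmem : a ∉ b :: t' := by
          intro hmem
          rcases List.mem_cons.mp hmem with h | h
          · exact heq h
          · have h1 := hat' a h
            have h2 := hbt' a h
            exact heq (le_antisymm hab h2)
        have hstep : adjEqLoop ((a :: b :: t').zip (a :: b :: t').tail)
            = adjEqLoop ((b :: t').zip (b :: t').tail) := by
          simp [adjEqLoop, heq]
        rw [hstep, ih hp']
        have : (a :: b :: t').Nodup ↔ (b :: t').Nodup := by
          simp [List.nodup_cons, hnotmem]
        rcases h : decide (b :: t').Nodup with _ | _
        · simp [this, of_decide_eq_false h]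
        · simp [this, of_decide_eq_true h]

-- ===== VERDICT (by name: the statement is the Claim_ definition above) =====
theorem hasDouble_spec : Claim_equal_hasDouble := by
  intro n _
  unfold Spec_hasDouble hasDouble hasDouble_alt
  simp only []
  set num := PySem.Int.toChars n with hnum
  set s := PySem.List.sorted num (fun c => c) false with hs
  have hperm : s.Perm num := PySem.List.sorted_perm num (fun c => c) false
  have hpw : s.Pairwise (· ≤ ·) := PySem.List.sorted_pairwise num (fun c => c)
  rw [loop_eq_any, any_count_eq_not_nodup, PySem.List.slice_from_one,
      adjEqLoop_eq_not_nodup s hpw]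
  have hnodup : decide s.Nodup = decide num.Nodup := by
    simp [hperm.nodup_iff]
  have hmem : s.contains '0' = decide ('0' ∈ num) := by
    simp [hperm.mem_iff]
  rw [hnodup, hmem]
  by_cases h0 : '0' ∈ num
  · have : num.count '0' ≠ 0 := by
      have := List.count_pos_iff.mpr h0; omega
    simp [this, h0]
  · have : ¬ num.count '0' ≠ 0 := by
      simp [List.count_eq_zero]; exact h0
    simp [this, h0]
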